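-- pv_equiv track=rewrite | github.com/AWestover/data_wrangling_functions | txt_functions.py | txt_word_range
-- ===== SOURCE A (Python) =====
-- def string_to_words(string: str, remove_punctuation='no', to_lower_case=False) -> list:
--     if to_lower_case:
--         string = string.lower()
--     all_words = string.split(' ')
--     if remove_punctuation == 'yes':
--         punctuation_list = [',', '.', '!', '?', '\n']
--         for i in range(0, len(all_words)):
--             for punctuation in punctuation_list:
--                 all_words[i] = all_words[i].replace(punctuation, '')
--     if remove_punctuation == 'For math!':
--         punctuation_list = [',', '!', '?', '\n']
--         for i in range(0, len(all_words)):
--             for punctuation in punctuation_list: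
--                 all_words[i] = all_words[i].replace(punctuation, '')
--     return all_words
--
-- def txt_word_range(mark_words, txt_string):
--     all_words = string_to_words(txt_string, to_lower_case=True, remove_punctuation='For math!')
--     mark = 0
--     excerpts = []
--     string_mark = 0
--     for i in range(0, len(all_words)):
--         if mark_words[mark] in all_words[i]:
--             if mark == 0:
--                 mark = 1
--                 string_mark = i
--             else:
--                 mark = 0
--                 excerpts.append(all_words[string_mark:i+1])
--     return excerpts
-- ===== SOURCE B (Python) =====
-- # string_to_words is the module's shared preprocessing helper, reused unchanged (A calls the same one).
-- def string_to_words(string: str, remove_punctuation='no', to_lower_case=False) -> list: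
--     if to_lower_case:
--         string = string.lower()
--     all_words = string.split(' ')
--     if remove_punctuation == 'yes':
--         punctuation_list = [',', '.', '!', '?', '\n']
--         for i in range(0, len(all_words)):
--             for punctuation in punctuation_list:
--                 all_words[i] = all_words[i].replace(punctuation, '')
--     if remove_punctuation == 'For math!':
--         punctuation_list = [',', '!', '?', '\n']
--         for i in range(0, len(all_words)):
--             for punctuation in punctuation_list:
--                 all_words[i] = all_words[i].replace(punctuation, '')
--     return all_words
--
--
-- def txt_word_range(mark_words, txt_string):
--     all_words = string_to_words(txt_string, to_lower_case=True, remove_punctuation='For math!')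
--     n = len(all_words)
--     excerpts = []
--     i = 0
--     while i < n:
--         if mark_words[0] in all_words[i]:
--             j = i + 1
--             while j < n and mark_words[1] not in all_words[j]:
--                 j += 1
--             if j == n:
--                 break
--             excerpts.append(all_words[i:j + 1])
--             i = j + 1
--         else:
--             i += 1
--     return excerpts
-- ===== Notes on version B (the rewrite author's own statement) =====
-- stated objective: alternative
-- what changed: Replaced A's single fold carrying a mark/string_mark state machine over all word indices with an explicit two-level while-loop decomposition: an outer index loop seeks the next word containing mark_words[0], an inner index loop seeks the following word containing mark_words[1] (short-circuiting so mark_words[1] is read only when a later word exists), and one inclusive excerpt is appended per outer iteration.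
import Mathlib
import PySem

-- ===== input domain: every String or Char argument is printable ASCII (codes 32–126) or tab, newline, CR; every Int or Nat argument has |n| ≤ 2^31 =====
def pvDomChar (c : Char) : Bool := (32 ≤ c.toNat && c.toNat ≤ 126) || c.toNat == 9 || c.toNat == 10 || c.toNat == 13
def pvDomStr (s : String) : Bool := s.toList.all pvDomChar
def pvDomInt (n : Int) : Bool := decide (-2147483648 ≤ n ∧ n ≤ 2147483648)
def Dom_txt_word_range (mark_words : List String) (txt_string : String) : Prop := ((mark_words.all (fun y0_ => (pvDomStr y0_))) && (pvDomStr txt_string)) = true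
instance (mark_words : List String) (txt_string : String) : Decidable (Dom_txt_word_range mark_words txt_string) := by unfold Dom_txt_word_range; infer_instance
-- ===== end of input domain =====

-- B replaces A's mark/string_mark state-machine fold over all word indices with two explicit
-- index-driven while loops: seek the next start word, then seek the matching end word, emit one
-- inclusive excerpt per outer iteration (objective: alternative; same cost).

-- ===== PORT A =====
-- shared same-module helper (B's Python reuses it verbatim)
def string_to_words (string : String) (remove_punctuation : String) (to_lower_case : Bool) : List String :=
  let string := if to_lower_case then PySem.Str.lower string else string
  let all_words := (PySem.Str.split? string " ").getD []   -- sep = " " ≠ "", so split? is `some`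
  let all_words := if remove_punctuation == "yes" then
      all_words.map (fun w => [",", ".", "!", "?", "\n"].foldl (fun w p => PySem.Str.replace w p "") w)
    else all_words
  let all_words := if remove_punctuation == "For math!" then
      all_words.map (fun w => [",", "!", "?", "\n"].foldl (fun w p => PySem.Str.replace w p "") w)
    else all_words
  all_words

-- one step of A's for-loop; state = (mark, excerpts, string_mark).
-- `mark_words[mark]` is ported as `getD mark ""`: in-range whenever the Python does not raise
-- (raising inputs are excluded by Pre_ below).
def txtStepA (mark_words : List String) (all_words : List String) :
    (Nat × List (List String) × Nat) → Nat → (Nat × List (List String) × Nat)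
  | (mark, excerpts, string_mark), i =>
    match PySem.Str.isIn (mark_words.getD mark "") (all_words.getD i "") with
    | false => (mark, excerpts, string_mark)
    | true =>
      if mark == 0 then (1, excerpts, i)
      else (0, excerpts ++ [PySem.List.slice all_words (some (string_mark : Int)) (some ((i : Int) + 1))], string_mark)

def txt_word_range (mark_words : List String) (txt_string : String) : List (List String) :=
  let all_words := string_to_words txt_string "For math!" true
  ((List.range all_words.length).foldl (txtStepA mark_words all_words) (0, [], 0)).2.1

-- ===== PORT B =====
-- B's inner while loop: advance j while j < n and word j does not contain mw1; returns final j
def findEndB (aw : List String) (mw1 : String) (j : Nat) : Nat :=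
  if h : j < aw.length then
    if PySem.Str.isIn mw1 aw[j] then j else findEndB aw mw1 (j + 1)
  else j
termination_by aw.length - j
decreasing_by exact Nat.sub_succ_lt_self aw.length j h

-- lower bound on the loop's final index; loopB's termination cites it
theorem findEndB_ge (aw : List String) (mw1 : String) :
    ∀ j, j ≤ findEndB aw mw1 j := by
  have main : ∀ d j, aw.length ≤ j + d → j ≤ findEndB aw mw1 j := by
    intro d
    induction d with
    | zero =>
      intro j hle
      rw [findEndB, dif_neg (Nat.not_lt.mpr (Nat.add_zero j ▸ hle))]
    | succ d ih =>
      intro j hle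
      by_cases h : j < aw.length
      · rw [findEndB, dif_pos h]
        by_cases hin : PySem.Str.isIn mw1 aw[j] = true
        · rw [if_pos hin]
        · rw [if_neg hin]
          exact Nat.le_of_succ_le (ih (j + 1) (Nat.add_right_comm j d 1 ▸ hle))
      · rw [findEndB, dif_neg h]
  intro j
  exact main aw.length j (Nat.le_add_left _ _)

-- B's outer while loop over index i with accumulator `excerpts`
def loopB (aw : List String) (mw0 mw1 : String) (acc : List (List String)) (i : Nat) :
    List (List String) :=
  if h : i < aw.length then
    if PySem.Str.isIn mw0 aw[i] then
      let j := findEndB aw mw1 (i + 1)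
      if j == aw.length then acc
      else loopB aw mw0 mw1 (acc ++ [PySem.List.slice aw (some (i : Int)) (some ((j : Int) + 1))]) (j + 1)
    else loopB aw mw0 mw1 acc (i + 1)
  else acc
termination_by aw.length - i
decreasing_by
  · have := findEndB_ge aw mw1 (i + 1)
    omega
  · exact Nat.sub_succ_lt_self aw.length i h

def txt_word_range_alt (mark_words : List String) (txt_string : String) : List (List String) :=
  let all_words := string_to_words txt_string "For math!" true
  loopB all_words (mark_words.getD 0 "") (mark_words.getD 1 "") [] 0

-- ===== PRECONDITION & SPEC =====
-- Pre_ admits exactly the inputs on which Python A returns (both programs raise IndexError on the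
-- rest, at the same inputs): it excludes mark_words = [] and the one-marker case in which some
-- word before the last contains the lone marker (A then reads mark_words[1] and raises).
def Pre_txt_word_range (mark_words : List String) (txt_string : String) : Prop :=
  2 ≤ mark_words.length ∨
    (mark_words.length = 1 ∧
      ∀ w ∈ (string_to_words txt_string "For math!" true).dropLast,
        PySem.Str.isIn (mark_words.getD 0 "") w = false)
instance (mark_words : List String) (txt_string : String) : Decidable (Pre_txt_word_range mark_words txt_string) := by
  unfold Pre_txt_word_range; infer_instance

def pvWitness_txt_word_range : List String × String := (["a", "b"], "a x b")

def Spec_txt_word_range (mark_words : List String) (txt_string : String) (out : List (List String)) : Prop := out = txt_word_range_alt mark_words txt_string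
instance (mark_words : List String) (txt_string : String) (out : List (List String)) : Decidable (Spec_txt_word_range mark_words txt_string out) := by unfold Spec_txt_word_range; infer_instance

-- ===== CLAIM (what is proved, stated in full; the proofs are below) =====
def Claim_equal_txt_word_range : Prop := ∀ (mark_words : List String) (txt_string : String), Dom_txt_word_range mark_words txt_string → Pre_txt_word_range mark_words txt_string → Spec_txt_word_range mark_words txt_string (txt_word_range mark_words txt_string)

-- ===== LEMMAS AND PROOFS =====

-- equation lemmas for loopB, one per branch of the while-loop body
theorem loopB_stop (aw : List String) (mw0 mw1 : String) (acc : List (List String)) (i : Nat)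
    (h : ¬ i < aw.length) : loopB aw mw0 mw1 acc i = acc := by
  rw [loopB, dif_neg h]

theorem loopB_skip (aw : List String) (mw0 mw1 : String) (acc : List (List String)) (i : Nat)
    (h : i < aw.length) (hmi : PySem.Str.isIn mw0 aw[i] = false) :
    loopB aw mw0 mw1 acc i = loopB aw mw0 mw1 acc (i + 1) := by
  conv_lhs => rw [loopB]
  rw [dif_pos h, if_neg (by rw [hmi]; exact Bool.false_ne_true)]

theorem loopB_hit (aw : List String) (mw0 mw1 : String) (acc : List (List String)) (i : Nat)
    (h : i < aw.length) (hmi : PySem.Str.isIn mw0 aw[i] = true) :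
    loopB aw mw0 mw1 acc i =
      (let j := findEndB aw mw1 (i + 1)
       if j == aw.length then acc
       else loopB aw mw0 mw1 (acc ++ [PySem.List.slice aw (some (i : Int)) (some ((j : Int) + 1))]) (j + 1)) := by
  conv_lhs => rw [loopB]
  rw [dif_pos h, if_pos hmi]

-- the invariant of A's fold, for loop states mark = 0 and mark = 1
def InvP0 (mark_words all_words : List String) (n i : Nat) : Prop :=
  ∀ acc sm,
    ((List.range' i (n - i)).foldl (txtStepA mark_words all_words) (0, acc, sm)).2.1 =
      loopB all_words (mark_words.getD 0 "") (mark_words.getD 1 "") acc i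

def InvP1 (mark_words all_words : List String) (n i : Nat) : Prop :=
  ∀ acc sm,
    ((List.range' i (n - i)).foldl (txtStepA mark_words all_words) (1, acc, sm)).2.1 =
      (let j := findEndB all_words (mark_words.getD 1 "") i
       if j == all_words.length then acc
       else loopB all_words (mark_words.getD 0 "") (mark_words.getD 1 "")
              (acc ++ [PySem.List.slice all_words (some (sm : Int)) (some ((j : Int) + 1))]) (j + 1))

theorem txt_invariant (mark_words all_words : List String) (n : Nat) (hn : n = all_words.length) :
    ∀ k i, i + k = n →
      InvP0 mark_words all_words n i ∧ InvP1 mark_words all_words n i := by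
  intro k
  induction k with
  | zero =>
    intro i hi
    have hin : ¬ i < all_words.length := by omega
    have hrange : n - i = 0 := by omega
    constructor
    · intro acc sm
      rw [hrange]
      simp only [List.range', List.foldl_nil]
      rw [loopB_stop _ _ _ _ _ hin]
    · intro acc sm
      rw [hrange]
      simp only [List.range', List.foldl_nil]
      have hfe : findEndB all_words (mark_words.getD 1 "") i = i := by
        rw [findEndB, dif_neg hin]
      simp only [hfe]
      rw [if_pos (beq_iff_eq.mpr (by omega : i = all_words.length))]
  | succ k ih =>
    intro i hi
    have hlt : i < all_words.length := by omega
    have hrange : n - i = k + 1 := by omega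
    have hcons : List.range' i (n - i) = i :: List.range' (i + 1) k := by
      rw [hrange, List.range'_succ]
    have hgetd : all_words.getD i "" = all_words[i] := List.getD_eq_getElem _ _ hlt
    obtain ⟨ih0, ih1⟩ := ih (i + 1) (by omega)
    have hrest : List.range' (i + 1) k = List.range' (i + 1) (n - (i + 1)) := by
      congr 1; omega
    constructor
    · intro acc sm
      rw [hcons, List.foldl_cons]
      by_cases hm : PySem.Str.isIn (mark_words.getD 0 "") (all_words.getD i "") = true
      · -- start marker found at i: A switches to mark = 1 with string_mark = i;
        -- B enters the inner loop from i + 1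
        have hmi : PySem.Str.isIn (mark_words.getD 0 "") all_words[i] = true := by
          rw [← hgetd]; exact hm
        have hstep : txtStepA mark_words all_words (0, acc, sm) i = (1, acc, i) := by
          simp only [txtStepA]
          rw [hm]
          rfl
        rw [hstep, hrest, ih1 acc i]
        rw [loopB_hit _ _ _ _ _ hlt hmi]
      · have hm' : PySem.Str.isIn (mark_words.getD 0 "") (all_words.getD i "") = false := by
          simpa using hm
        have hmi : PySem.Str.isIn (mark_words.getD 0 "") all_words[i] = false := by
          rw [← hgetd]; exact hm'
        have hstep : txtStepA mark_words all_words (0, acc, sm) i = (0, acc, sm) := by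
          simp only [txtStepA]
          rw [hm']
        rw [hstep, hrest, ih0 acc sm]
        rw [loopB_skip _ _ _ _ _ hlt hmi]
    · intro acc sm
      rw [hcons, List.foldl_cons]
      by_cases hm : PySem.Str.isIn (mark_words.getD 1 "") (all_words.getD i "") = true
      · -- end marker found at i: A appends the inclusive slice and resets mark;
        -- B's inner loop stops at j = i
        have hmi : PySem.Str.isIn (mark_words.getD 1 "") all_words[i] = true := by
          rw [← hgetd]; exact hm
        have hfe : findEndB all_words (mark_words.getD 1 "") i = i := by
          rw [findEndB, dif_pos hlt, if_pos hmi]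
        have hstep : txtStepA mark_words all_words (1, acc, sm) i =
            (0, acc ++ [PySem.List.slice all_words (some (sm : Int)) (some ((i : Int) + 1))], sm) := by
          simp only [txtStepA]
          rw [hm]
          rfl
        rw [hstep, hrest, ih0 _ sm]
        simp only [hfe]
        rw [if_neg (by rw [beq_eq_false_iff_ne.mpr (Nat.ne_of_lt hlt)]; exact Bool.false_ne_true)]
      · have hm' : PySem.Str.isIn (mark_words.getD 1 "") (all_words.getD i "") = false := by
          simpa using hm
        have hmi : PySem.Str.isIn (mark_words.getD 1 "") all_words[i] = false := by
          rw [← hgetd]; exact hm'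
        have hfe : findEndB all_words (mark_words.getD 1 "") i =
            findEndB all_words (mark_words.getD 1 "") (i + 1) := by
          rw [findEndB, dif_pos hlt, if_neg (by rw [hmi]; exact Bool.false_ne_true)]
        have hstep : txtStepA mark_words all_words (1, acc, sm) i = (1, acc, sm) := by
          simp only [txtStepA]
          rw [hm']
        rw [hstep, hrest, ih1 acc sm]
        simp only [hfe]

-- ===== VERDICT (by name: the statement is the Claim_ definition above) =====
theorem txt_word_range_spec : Claim_equal_txt_word_range := by
  intro mark_words txt_string _hdom _hpre
  unfold Spec_txt_word_range txt_word_range txt_word_range_alt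
  have h := (txt_invariant mark_words (string_to_words txt_string "For math!" true)
      (string_to_words txt_string "For math!" true).length rfl
      (string_to_words txt_string "For math!" true).length 0 (by omega)).1 [] 0
  simpa [List.range_eq_range'] using h
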